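-- pv_equiv track=rewrite | github.com/sagidana/cai | src/cai/transforms.py | _first_balanced_json
-- ===== SOURCE A (Python) =====
-- def _first_balanced_json(s: str) -> str | None:
--     """Return the first balanced ``[...]`` or ``{...}`` substring, or None."""
--     depth = 0
--     start = -1
--     in_str = False
--     escape = False
--     opener = None
--     closer_for = {"[": "]", "{": "}"}
--     for i, ch in enumerate(s):
--         if escape:
--             escape = False
--             continue
--         if in_str:
--             if ch == "\\":
--                 escape = True
--             elif ch == '"':
--                 in_str = False
--             continue
--         if ch == '"':
--             in_str = True
--             continue
--         if depth == 0 and ch in "[{":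
--             start = i
--             opener = ch
--             depth = 1
--             continue
--         if depth > 0:
--             if ch in "[{":
--                 depth += 1
--             elif ch == closer_for.get(opener) and ch == ("]" if opener == "[" else "}"):
--                 # Only count matching closer for the top-level opener; nested
--                 # brackets of any kind are tracked via depth.
--                 depth -= 1
--                 if depth == 0:
--                     return s[start:i + 1]
--             elif ch in "]}":
--                 depth -= 1
--                 if depth == 0:
--                     return s[start:i + 1]
--     return None
-- ===== SOURCE B (Python) =====
-- def _string_mask(s):
--     """Mark positions that are string-literal quotes or lie inside a string literal."""
--     mask = [False] * len(s)
--     in_str = False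
--     escape = False
--     for i, ch in enumerate(s):
--         if escape:
--             mask[i] = True
--             escape = False
--         elif in_str:
--             mask[i] = True
--             if ch == "\\":
--                 escape = True
--             elif ch == '"':
--                 in_str = False
--         elif ch == '"':
--             mask[i] = True
--             in_str = True
--     return mask
--
--
-- def _first_balanced_json(s: str) -> str | None:
--     """Return the first balanced ``[...]`` or ``{...}`` substring, or None."""
--     mask = _string_mask(s)
--     depth = 0
--     start = 0
--     for i, ch in enumerate(s):
--         if mask[i]:
--             continue
--         if ch in "[{":
--             if depth == 0:
--                 start = i
--             depth += 1
--         elif ch in "]}" and depth > 0: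
--             depth -= 1
--             if depth == 0:
--                 return s[start:i + 1]
--     return None
-- ===== Notes on version B (the rewrite author's own statement) =====
-- stated objective: simpler
-- what changed: Replaced A's single fused state machine (depth/start/in_str/escape/opener plus a closer_for dict with two redundant closer branches) by two clean passes: first build a boolean mask of positions inside string literals, then a plain bracket-depth scan that skips masked positions.
import Mathlib
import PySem

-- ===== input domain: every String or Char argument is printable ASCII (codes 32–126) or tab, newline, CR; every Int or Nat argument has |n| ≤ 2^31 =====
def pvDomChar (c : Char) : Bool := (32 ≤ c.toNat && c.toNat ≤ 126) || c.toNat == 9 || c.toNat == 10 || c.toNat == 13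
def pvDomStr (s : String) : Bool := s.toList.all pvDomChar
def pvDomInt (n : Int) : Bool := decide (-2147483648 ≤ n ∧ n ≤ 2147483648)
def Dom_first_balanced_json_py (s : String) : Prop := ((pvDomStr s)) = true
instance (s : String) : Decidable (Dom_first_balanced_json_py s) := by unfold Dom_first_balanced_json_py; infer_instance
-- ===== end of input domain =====

-- B separates A's fused state machine into two passes (a string-literal mask, then a plain bracket-depth
-- scan); objective: simpler. Same return value everywhere.

-- ===== PORT A =====
-- closer_for = {"[": "]", "{": "}"}
def pvCloserFor : PySem.Dict Char Char := PySem.Dict.ofList [('[', ']'), ('{', '}')]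

-- the single fused loop of A; state: index i, depth, start, in_str, escape, opener
def pvALoop (s : String) : List Char → Nat → Int → Int → Bool → Bool → Option Char → Option String
  | [], _, _, _, _, _, _ => none
  | ch :: rest, i, depth, start, inStr, escape, opener =>
    if escape then pvALoop s rest (i+1) depth start inStr false opener
    else if inStr then
      if ch = '\\' then pvALoop s rest (i+1) depth start inStr true opener
      else if ch = '"' then pvALoop s rest (i+1) depth start false escape opener
      else pvALoop s rest (i+1) depth start inStr escape opener
    else if ch = '"' then pvALoop s rest (i+1) depth start true escape opener
    else if depth = 0 ∧ (ch = '[' ∨ ch = '{') then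
      pvALoop s rest (i+1) 1 (Int.ofNat i) inStr escape (some ch)
    else if depth > 0 then
      if ch = '[' ∨ ch = '{' then pvALoop s rest (i+1) (depth+1) start inStr escape opener
      -- ch == closer_for.get(opener) and ch == ("]" if opener == "[" else "}")
      else if (opener.bind (fun o => PySem.Dict.get? pvCloserFor o)) = some ch ∧
              ch = (if opener = some '[' then ']' else '}') then
        if depth - 1 = 0 then some (PySem.Str.slice s (some start) (some (Int.ofNat i + 1)))
        else pvALoop s rest (i+1) (depth-1) start inStr escape opener
      else if ch = ']' ∨ ch = '}' then
        if depth - 1 = 0 then some (PySem.Str.slice s (some start) (some (Int.ofNat i + 1)))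
        else pvALoop s rest (i+1) (depth-1) start inStr escape opener
      else pvALoop s rest (i+1) depth start inStr escape opener
    else pvALoop s rest (i+1) depth start inStr escape opener

def first_balanced_json_py (s : String) : Option String :=
  pvALoop s s.toList 0 0 (-1) false false none

-- ===== PORT B =====
-- pass 1: mark the positions that are string-literal quotes or lie inside a string literal
def pvStrMask : List Char → Bool → Bool → List Bool
  | [], _, _ => []
  | ch :: rest, inStr, escape =>
    if escape then true :: pvStrMask rest inStr false
    else if inStr then
      if ch = '\\' then true :: pvStrMask rest inStr true
      else if ch = '"' then true :: pvStrMask rest false false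
      else true :: pvStrMask rest inStr escape
    else if ch = '"' then true :: pvStrMask rest true escape
    else false :: pvStrMask rest inStr escape

-- pass 2: plain bracket-depth scan over (mask, char) pairs
def pvBLoop (s : String) : List (Bool × Char) → Nat → Int → Int → Option String
  | [], _, _, _ => none
  | (m, ch) :: rest, i, depth, start =>
    if m then pvBLoop s rest (i+1) depth start
    else if ch = '[' ∨ ch = '{' then
      pvBLoop s rest (i+1) (depth+1) (if depth = 0 then Int.ofNat i else start)
    else if (ch = ']' ∨ ch = '}') ∧ depth > 0 then
      if depth - 1 = 0 then some (PySem.Str.slice s (some start) (some (Int.ofNat i + 1)))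
      else pvBLoop s rest (i+1) (depth-1) start
    else pvBLoop s rest (i+1) depth start

def first_balanced_json_py_alt (s : String) : Option String :=
  pvBLoop s ((pvStrMask s.toList false false).zip s.toList) 0 0 0

-- ===== PRECONDITION & SPEC =====
def Spec_first_balanced_json_py (s : String) (out : Option String) : Prop := out = first_balanced_json_py_alt s
instance (s : String) (out : Option String) : Decidable (Spec_first_balanced_json_py s out) := by unfold Spec_first_balanced_json_py; infer_instance

-- ===== CLAIM (what is proved, stated in full; the proofs are below) =====
def Claim_equal_first_balanced_json_py : Prop := ∀ (s : String), Dom_first_balanced_json_py s → Spec_first_balanced_json_py s (first_balanced_json_py s)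

-- ===== LEMMAS AND PROOFS =====

-- Core invariant: A's fused loop equals B's masked scan, for any in-string state, provided the
-- two start values agree whenever depth ≠ 0 (at depth 0 neither loop reads start before resetting it).
lemma pvLoop_eq (s : String) : ∀ (rest : List Char) (i : Nat) (depth startA startB : Int)
    (inStr escape : Bool) (opener : Option Char),
    0 ≤ depth →
    (depth ≠ 0 → startA = startB) →
    pvALoop s rest i depth startA inStr escape opener
      = pvBLoop s ((pvStrMask rest inStr escape).zip rest) i depth startB := by
  intro rest
  induction rest with
  | nil => intro i depth startA startB inStr escape opener _ _; simp [pvALoop, pvStrMask, pvBLoop]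
  | cons ch rest ih =>
    intro i depth startA startB inStr escape opener hdep hstart
    simp only [pvALoop, pvStrMask]
    by_cases he : escape = true
    · subst he
      simp only [if_pos rfl, List.zip_cons_cons, pvBLoop, if_pos rfl]
      exact ih (i+1) depth startA startB inStr false opener hdep hstart
    · replace he : escape = false := by cases escape <;> simp_all
      subst he
      simp only [Bool.false_eq_true, if_false, List.zip_cons_cons]
      by_cases hin : inStr = true
      · subst hin
        simp only [if_pos rfl]
        by_cases hb : ch = '\\'
        · subst hb
          simp only [if_pos rfl, pvBLoop, if_pos rfl]
          exact ih (i+1) depth startA startB true true opener hdep hstart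
        · by_cases hq : ch = '"'
          · subst hq
            simp only [if_neg hb, if_pos rfl, pvBLoop]
            exact ih (i+1) depth startA startB false false opener (by omega) hstart
          · simp only [if_neg hb, if_neg hq, pvBLoop, if_pos rfl]
            exact ih (i+1) depth startA startB true false opener hdep hstart
      · replace hin : inStr = false := by cases inStr <;> simp_all
        subst hin
        simp only [Bool.false_eq_true, if_false]
        by_cases hq : ch = '"'
        · subst hq
          simp only [if_pos rfl, pvBLoop]
          exact ih (i+1) depth startA startB true false opener hdep hstart
        · -- unmasked character
          simp only [if_neg hq]
          rw [List.zip_cons_cons]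
          simp only [pvBLoop, Bool.false_eq_true, if_false]
          by_cases hopen : ch = '[' ∨ ch = '{'
          · simp only [if_pos hopen]
            by_cases hd0 : depth = 0
            · subst hd0
              simp only [eq_self_iff_true, true_and, if_pos hopen, if_pos rfl]
              exact ih (i+1) 1 (Int.ofNat i) (Int.ofNat i) false false (some ch) (by omega) (fun _ => rfl)
            · simp only [if_neg (fun h : depth = 0 ∧ _ => hd0 h.1), if_neg hd0]
              by_cases hp : depth > 0
              · simp only [if_pos hp, if_pos hopen]
                exact ih (i+1) (depth+1) startA startB false false opener (by omega) (fun _ => hstart hd0)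
              · exact absurd (by omega : depth > 0) hp
          · simp only [if_neg hopen, if_neg (fun h : depth = 0 ∧ _ => hopen h.2)]
            by_cases hclose : ch = ']' ∨ ch = '}'
            · by_cases hp : depth > 0
              · have hd0 : depth ≠ 0 := by omega
                have hs := hstart hd0
                subst hs
                simp only [if_pos hp, if_pos (And.intro hclose hp), if_neg hopen]
                by_cases hc1 : (opener.bind (fun o => PySem.Dict.get? pvCloserFor o)) = some ch ∧
                    ch = (if opener = some '[' then ']' else '}')
                · simp only [if_pos hc1]
                  by_cases hz : depth - 1 = 0
                  · simp only [if_pos hz]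
                  · simp only [if_neg hz]
                    exact ih (i+1) (depth-1) startA startA false false opener (by omega) (fun _ => rfl)
                · simp only [if_neg hc1, if_pos hclose]
                  by_cases hz : depth - 1 = 0
                  · simp only [if_pos hz]
                  · simp only [if_neg hz]
                    exact ih (i+1) (depth-1) startA startA false false opener (by omega) (fun _ => rfl)
              · simp only [if_neg hp, if_neg (fun h : _ ∧ depth > 0 => hp h.2)]
                exact ih (i+1) depth startA startB false false opener (by omega) hstart
            · simp only [if_neg (fun h : (ch = ']' ∨ ch = '}') ∧ _ => hclose h.1)]
              by_cases hp : depth > 0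
              · have hc1 : ¬ ((opener.bind (fun o => PySem.Dict.get? pvCloserFor o)) = some ch ∧
                    ch = (if opener = some '[' then ']' else '}')) := by
                  intro h
                  rcases h with ⟨_, h2⟩
                  apply hclose
                  split at h2 <;> simp [h2]
                simp only [if_pos hp, if_neg hopen, if_neg hc1, if_neg hclose]
                exact ih (i+1) depth startA startB false false opener (by omega) hstart
              · simp only [if_neg hp]
                exact ih (i+1) depth startA startB false false opener (by omega) hstart

-- ===== VERDICT (by name: the statement is the Claim_ definition above) =====
theorem first_balanced_json_py_spec : Claim_equal_first_balanced_json_py := by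
  intro s _
  unfold Spec_first_balanced_json_py first_balanced_json_py first_balanced_json_py_alt
  exact pvLoop_eq s s.toList 0 0 (-1) 0 false false none le_rfl (fun h => absurd rfl h)
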